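-- pv_equiv track=rewrite | github.com/durgaharish1993/EM | viterbi_align.py | read_data_arguments
-- ===== SOURCE A (Python) =====
-- def read_data_arguments(lines):
--     train_data = []
--     count=0
--     ep_bin=True
--     for line in lines:
--         count+=1
--         if count%3==0:
--             train_data+=[(ep,jp)]
--             ep_bin=True
--             continue
--
--         if ep_bin==True:
--             ep = line[:-1]
--             ep_bin=False
--         else:
--             jp=line[:-1]
--             ep_bin=True
--
--     return train_data
-- ===== SOURCE B (Python) =====
-- def read_data_arguments(lines):
--     train_data = []
--     g = len(lines) // 3
--     for i in range(g):
--         train_data.append((lines[3 * i][:-1], lines[3 * i + 1][:-1]))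
--     return train_data
-- ===== Notes on version B (the rewrite author's own statement) =====
-- stated objective: simpler
-- what changed: Replaces the stateful per-line counter/ep_bin toggle scan with direct group-index arithmetic: compute g = len(lines)//3 once and read lines[3*i], lines[3*i+1] for each group.
import Mathlib
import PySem

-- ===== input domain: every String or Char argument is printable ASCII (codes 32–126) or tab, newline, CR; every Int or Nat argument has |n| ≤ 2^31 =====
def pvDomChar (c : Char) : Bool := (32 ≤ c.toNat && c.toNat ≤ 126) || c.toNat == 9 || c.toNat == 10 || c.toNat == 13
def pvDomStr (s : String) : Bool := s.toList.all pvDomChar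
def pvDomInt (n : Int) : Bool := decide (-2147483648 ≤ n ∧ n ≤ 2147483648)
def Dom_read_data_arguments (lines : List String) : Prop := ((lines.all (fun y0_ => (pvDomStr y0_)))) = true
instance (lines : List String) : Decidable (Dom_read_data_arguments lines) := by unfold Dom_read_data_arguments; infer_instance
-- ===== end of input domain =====

-- B replaces A's stateful per-line counter/ep_bin-toggle scan with direct group-index
-- arithmetic over g = len(lines)//3 complete groups (objective: simpler).


-- ===== PORT A =====
-- state: (train_data, count, ep_bin, ep, jp); ep/jp start as "" (Python: unbound,
-- but they are never read before being assigned, so this is exact on all inputs)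
def read_data_arguments_step :
    List (String × String) × Int × Bool × String × String → String →
    List (String × String) × Int × Bool × String × String
  | (td, count, ep_bin, ep, jp), line =>
    let count := count + 1
    if PySem.Int.mod count 3 = 0 then
      (td ++ [(ep, jp)], count, true, ep, jp)
    else if ep_bin = true then
      (td, count, false, PySem.Str.slice line none (some (-1)), jp)
    else
      (td, count, true, ep, PySem.Str.slice line none (some (-1)))

def read_data_arguments (lines : List String) : List (String × String) :=
  (lines.foldl read_data_arguments_step ([], 0, true, "", "")).1

-- ===== PORT B =====
def read_data_arguments_alt (lines : List String) : List (String × String) :=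
  let g : Int := PySem.Int.floordiv (lines.length : Int) 3
  (PySem.List.pyRange 0 g 1).foldl
    (fun td i =>
      td ++ [(PySem.Str.slice (PySem.List.pyGetD lines (3 * i) "") none (some (-1)),
              PySem.Str.slice (PySem.List.pyGetD lines (3 * i + 1) "") none (some (-1)))])
    []   -- indices 3*i, 3*i+1 < len(lines) for i < g, so Python's lines[...] never raises

-- ===== PRECONDITION & SPEC =====
def Spec_read_data_arguments (lines : List String) (out : List (String × String)) : Prop := out = read_data_arguments_alt lines
instance (lines : List String) (out : List (String × String)) : Decidable (Spec_read_data_arguments lines out) := by unfold Spec_read_data_arguments; infer_instance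

-- ===== CLAIM (what is proved, stated in full; the proofs are below) =====
def Claim_equal_read_data_arguments : Prop := ∀ (lines : List String), Dom_read_data_arguments lines → Spec_read_data_arguments lines (read_data_arguments lines)

-- ===== LEMMAS AND PROOFS =====

-- the common value: pairs from each complete group of 3 lines
def rdaChunk : List String → List (String × String)
  | a :: b :: _ :: t =>
      (PySem.Str.slice a none (some (-1)), PySem.Str.slice b none (some (-1))) :: rdaChunk t
  | _ => []

theorem rda_fold_eq_chunk (ls : List String) :
    ∀ (td : List (String × String)) (k : Nat) (e j : String),
      (ls.foldl read_data_arguments_step (td, (3 * k : Int), true, e, j)).1 = td ++ rdaChunk ls := by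
  induction ls using rdaChunk.induct with
  | case1 a b c t ih =>
      intro td k e j
      have h1 : PySem.Int.mod (3 * (k : Int) + 1) 3 ≠ 0 := by
        rw [PySem.Int.mod_eq_emod_of_pos (by omega : (0:Int) < 3)]; omega
      have h2 : PySem.Int.mod (3 * (k : Int) + 1 + 1) 3 ≠ 0 := by
        rw [PySem.Int.mod_eq_emod_of_pos (by omega : (0:Int) < 3)]; omega
      have h3 : PySem.Int.mod (3 * (k : Int) + 1 + 1 + 1) 3 = 0 := by
        rw [PySem.Int.mod_eq_emod_of_pos (by omega : (0:Int) < 3)]; omega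
      have e1 : read_data_arguments_step (td, (3 * k : Int), true, e, j) a =
          (td, 3 * (k : Int) + 1, false, PySem.Str.slice a none (some (-1)), j) := by
        simp only [read_data_arguments_step]
        rw [if_neg h1]; simp
      have e2 : read_data_arguments_step
          (td, 3 * (k : Int) + 1, false, PySem.Str.slice a none (some (-1)), j) b =
          (td, 3 * (k : Int) + 1 + 1, true, PySem.Str.slice a none (some (-1)),
            PySem.Str.slice b none (some (-1))) := by
        simp only [read_data_arguments_step]
        rw [if_neg h2]; simp
      have e3 : read_data_arguments_step
          (td, 3 * (k : Int) + 1 + 1, true, PySem.Str.slice a none (some (-1)),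
            PySem.Str.slice b none (some (-1))) c =
          (td ++ [(PySem.Str.slice a none (some (-1)), PySem.Str.slice b none (some (-1)))],
            3 * ((k + 1 : Nat) : Int), true, PySem.Str.slice a none (some (-1)),
            PySem.Str.slice b none (some (-1))) := by
        simp only [read_data_arguments_step]
        rw [if_pos h3]
        have hk : (3 * (k : Int) + 1 + 1 + 1) = 3 * ((k + 1 : Nat) : Int) := by push_cast; ring
        rw [hk]
      rw [List.foldl_cons, e1, List.foldl_cons, e2, List.foldl_cons, e3,
        ih _ (k + 1), rdaChunk]
      simp
  | case2 ls hshape =>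
      intro td k e j
      have h1 : PySem.Int.mod (3 * (k : Int) + 1) 3 ≠ 0 := by
        rw [PySem.Int.mod_eq_emod_of_pos (by omega : (0:Int) < 3)]; omega
      have h2 : PySem.Int.mod (3 * (k : Int) + 1 + 1) 3 ≠ 0 := by
        rw [PySem.Int.mod_eq_emod_of_pos (by omega : (0:Int) < 3)]; omega
      match ls, hshape with
      | [], _ =>
          simp [rdaChunk]
      | [a], _ =>
          have e1 : read_data_arguments_step (td, (3 * k : Int), true, e, j) a =
              (td, 3 * (k : Int) + 1, false, PySem.Str.slice a none (some (-1)), j) := by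
            simp only [read_data_arguments_step]
            rw [if_neg h1]; simp
          rw [List.foldl_cons, e1]
          simp [rdaChunk]
      | [a, b], _ =>
          have e1 : read_data_arguments_step (td, (3 * k : Int), true, e, j) a =
              (td, 3 * (k : Int) + 1, false, PySem.Str.slice a none (some (-1)), j) := by
            simp only [read_data_arguments_step]
            rw [if_neg h1]; simp
          have e2 : read_data_arguments_step
              (td, 3 * (k : Int) + 1, false, PySem.Str.slice a none (some (-1)), j) b =
              (td, 3 * (k : Int) + 1 + 1, true, PySem.Str.slice a none (some (-1)),
                PySem.Str.slice b none (some (-1))) := by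
            simp only [read_data_arguments_step]
            rw [if_neg h2]; simp
          rw [List.foldl_cons, e1, List.foldl_cons, e2]
          simp [rdaChunk]
      | a :: b :: c :: t, hs =>
          exact absurd rfl (hs a b c t)

theorem rda_A_eq_chunk (lines : List String) : read_data_arguments lines = rdaChunk lines := by
  have h := rda_fold_eq_chunk lines [] 0 "" ""
  simp only [Nat.cast_zero, mul_zero, List.nil_append] at h
  exact h

theorem rda_map_range_eq_chunk (ls : List String) :
    (List.range (ls.length / 3)).map
      (fun (k : Nat) =>
        (PySem.Str.slice (ls.getD (3 * k) "") none (some (-1)),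
         PySem.Str.slice (ls.getD (3 * k + 1) "") none (some (-1)))) = rdaChunk ls := by
  induction ls using rdaChunk.induct with
  | case1 a b c t ih =>
      have hlen : (a :: b :: c :: t).length / 3 = t.length / 3 + 1 := by
        simp only [List.length_cons]; omega
      rw [hlen, List.range_succ_eq_map, List.map_cons, List.map_map, rdaChunk]
      refine congrArg₂ List.cons rfl ?_
      rw [← ih]
      apply List.map_congr_left
      intro k _
      simp only [Function.comp]
      have g1 : (a :: b :: c :: t).getD (3 * (k + 1)) "" = t.getD (3 * k) "" := by
        simp [show 3 * (k + 1) = 3 * k + 1 + 1 + 1 from by omega]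
      have g2 : (a :: b :: c :: t).getD (3 * (k + 1) + 1) "" = t.getD (3 * k + 1) "" := by
        simp [show 3 * (k + 1) + 1 = 3 * k + 1 + 1 + 1 + 1 from by omega]
      rw [g1, g2]
  | case2 ls hshape =>
      match ls, hshape with
      | [], _ => simp [rdaChunk]
      | [a], _ => simp [rdaChunk]
      | [a, b], _ => simp [rdaChunk]
      | a :: b :: c :: t, hs => exact absurd rfl (hs a b c t)

theorem rda_B_eq_chunk (lines : List String) : read_data_arguments_alt lines = rdaChunk lines := by
  unfold read_data_arguments_alt
  rw [PySem.List.foldl_append_singleton_eq_map]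
  have hg : PySem.Int.floordiv (lines.length : Int) 3 = ((lines.length / 3 : Nat) : Int) := by
    simp
  rw [hg, PySem.List.pyRange_zero_natCast, List.map_map, List.nil_append,
    ← rda_map_range_eq_chunk]
  apply List.map_congr_left
  intro k _
  simp only [Function.comp]
  have c1 : (3 : Int) * (k : Int) = ((3 * k : Nat) : Int) := by push_cast; ring
  have c2 : (3 : Int) * (k : Int) + 1 = ((3 * k + 1 : Nat) : Int) := by push_cast; ring
  rw [c2, c1, PySem.List.pyGetD_natCast, PySem.List.pyGetD_natCast]

-- ===== VERDICT (by name: the statement is the Claim_ definition above) =====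
theorem read_data_arguments_spec : Claim_equal_read_data_arguments := by
  intro lines _
  unfold Spec_read_data_arguments
  rw [rda_A_eq_chunk, rda_B_eq_chunk]
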